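-- pv_equiv track=rewrite | github.com/djwooten/synergy | development/replace_exponents/replace_exponents.py | get_preceeding_factor
-- ===== SOURCE A (Python) =====
-- def get_preceeding_factor(s, idx, close_to_open):
--     # return start_idx, substr
--     if s[idx-1]==")":
--         start_idx = close_to_open[idx-1]
--         return start_idx, s[start_idx:idx]
--     else:
--         # Need to find the closest preceeding +,-,*,/
--         prev_operator = 0
--         for operator in ["+", "-", "*", "/"]:
--             op_idx = s.rfind(operator, 0, idx)
--             if op_idx > prev_operator:
--                 prev_operator = op_idx
--         start_idx = prev_operator
--         return start_idx+1, s[start_idx+1:idx]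
-- ===== SOURCE B (Python) =====
-- def get_preceeding_factor(s, idx, close_to_open):
--     # return start_idx, substr
--     if s[idx-1] == ")":
--         start_idx = close_to_open[idx-1]
--         return start_idx, s[start_idx:idx]
--     # scan the prefix before idx backward for the nearest +,-,*,/
--     # (an operator cannot sit at position 0, so stop the scan at 1)
--     prefix = s[:idx]
--     start = 0
--     for j in range(len(prefix) - 1, 0, -1):
--         if prefix[j] in "+-*/":
--             start = j
--             break
--     return start + 1, s[start+1:idx]
-- ===== Notes on version B (the rewrite author's own statement) =====
-- stated objective: alternative
-- what changed: A runs four full rfind scans (one per operator character) over s[0:idx] and keeps a running maximum; B slices the prefix s[:idx] once and scans it backward, returning at the first +,-,*,/ it meets, so one early-exiting pass replaces four full scans plus a max (same asymptotic cost; A's C-level rfind is not beaten in wall time).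
import Mathlib
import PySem

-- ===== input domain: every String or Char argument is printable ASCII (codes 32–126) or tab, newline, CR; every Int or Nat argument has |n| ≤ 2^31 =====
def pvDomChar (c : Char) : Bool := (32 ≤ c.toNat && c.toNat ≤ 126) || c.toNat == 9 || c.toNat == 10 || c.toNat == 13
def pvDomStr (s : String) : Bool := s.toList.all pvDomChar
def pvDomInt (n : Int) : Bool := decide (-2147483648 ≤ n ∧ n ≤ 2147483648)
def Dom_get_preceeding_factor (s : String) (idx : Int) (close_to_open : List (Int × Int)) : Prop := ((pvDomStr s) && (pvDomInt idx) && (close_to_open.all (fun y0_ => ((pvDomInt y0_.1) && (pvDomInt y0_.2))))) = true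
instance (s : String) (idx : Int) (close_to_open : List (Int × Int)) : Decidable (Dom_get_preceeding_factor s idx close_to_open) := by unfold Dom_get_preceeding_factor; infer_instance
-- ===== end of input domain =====

-- B replaces A's four full `rfind` scans (one per operator) plus a running maximum by slicing the
-- prefix s[:idx] once and scanning it backward, stopping at the first +,-,*,/ it meets
-- (objective: alternative single-scan algorithm; equal return values are proved under Pre_ below).

-- ===== PORT A =====
-- literal transliteration of A; the `.getD 0` only fills the KeyError case excluded by Pre_
def get_preceeding_factor (s : String) (idx : Int) (close_to_open : List (Int × Int)) : Int × String :=
  if PySem.Str.pyGet? s (idx - 1) = some ')' then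
    let start_idx := (PySem.Dict.get? (PySem.Dict.mk close_to_open) (idx - 1)).getD 0
    (start_idx, PySem.Str.slice s (some start_idx) (some idx))
  else
    let prev_operator := ["+", "-", "*", "/"].foldl
      (fun prev_operator operator =>
        let op_idx := PySem.Str.rfindFrom s operator 0 (some idx)
        if op_idx > prev_operator then op_idx else prev_operator) 0
    (prev_operator + 1, PySem.Str.slice s (some (prev_operator + 1)) (some idx))

-- ===== PORT B =====
-- `for j in range(len(prefix)-1, 0, -1): if prefix[j] in "+-*/": start = j; break` with
-- default `start = 0`; the `none` arm of the match is unreachable (every scanned j is in range)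
def pvAltScan (s : List Char) : List Int → Int
  | [] => 0
  | j :: rest =>
    match PySem.List.pyGet? s j with
    | some c => if c ∈ "+-*/".toList then j else pvAltScan s rest
    | none => pvAltScan s rest

def get_preceeding_factor_alt (s : String) (idx : Int) (close_to_open : List (Int × Int)) : Int × String :=
  if PySem.Str.pyGet? s (idx - 1) = some ')' then
    let start_idx := (PySem.Dict.get? (PySem.Dict.mk close_to_open) (idx - 1)).getD 0
    (start_idx, PySem.Str.slice s (some start_idx) (some idx))
  else
    let pref := PySem.Str.slice s none (some idx)
    let start := pvAltScan pref.toList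
      (PySem.List.pyRange ((pref.toList.length : Int) - 1) 0 (-1))
    (start + 1, PySem.Str.slice s (some (start + 1)) (some idx))

-- ===== PRECONDITION & SPEC =====
-- Pre_ excludes exactly the inputs where Python A raises: IndexError when idx-1 is out of range
-- for s, and KeyError when s[idx-1] is ')' but idx-1 is not a key of close_to_open.
def Pre_get_preceeding_factor (s : String) (idx : Int) (close_to_open : List (Int × Int)) : Prop :=
  (PySem.Str.pyGet? s (idx - 1)).isSome = true ∧
  (PySem.Str.pyGet? s (idx - 1) = some ')' →
    (PySem.Dict.get? (PySem.Dict.mk close_to_open) (idx - 1)).isSome = true)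
instance (s : String) (idx : Int) (close_to_open : List (Int × Int)) : Decidable (Pre_get_preceeding_factor s idx close_to_open) := by unfold Pre_get_preceeding_factor; infer_instance

def pvWitness_get_preceeding_factor : String × Int × (List (Int × Int)) := ("a+b*c", 5, [(3, 1)])

def Spec_get_preceeding_factor (s : String) (idx : Int) (close_to_open : List (Int × Int)) (out : Int × String) : Prop := out = get_preceeding_factor_alt s idx close_to_open
instance (s : String) (idx : Int) (close_to_open : List (Int × Int)) (out : Int × String) : Decidable (Spec_get_preceeding_factor s idx close_to_open out) := by unfold Spec_get_preceeding_factor; infer_instance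

-- ===== CLAIM (what is proved, stated in full; the proofs are below) =====
def Claim_equal_get_preceeding_factor : Prop := ∀ (s : String) (idx : Int) (close_to_open : List (Int × Int)), Dom_get_preceeding_factor s idx close_to_open → Pre_get_preceeding_factor s idx close_to_open → Spec_get_preceeding_factor s idx close_to_open (get_preceeding_factor s idx close_to_open)

-- ===== LEMMAS AND PROOFS =====

-- descending linear search: pvD q j scans j, j-1, …, 0 and returns the first (= highest)
-- index satisfying q, else -1
def pvD (q : Nat → Bool) : Nat → Int
  | 0 => if q 0 then 0 else -1
  | j + 1 => if q (j + 1) then ((j : Int) + 1) else pvD q j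

lemma pvSingleton_prefix (c : Char) (t : List Char) : [c] <+: t ↔ t[0]? = some c := by
  cases t with
  | nil => simp
  | cons x xs => simp [List.cons_prefix_cons, eq_comm]

lemma pvGo_eq (t : List Char) (c : Char) (j : Nat) :
    PySem.Chars.rfind.go t [c] j = pvD (fun p => t[p]? == some c) j := by
  induction j with
  | zero => simp [PySem.Chars.rfind.go, pvD, pvSingleton_prefix]
  | succ j ih =>
    simp [PySem.Chars.rfind.go, pvD, pvSingleton_prefix, ih, List.getElem?_drop]

lemma pvD_congr {q q' : Nat → Bool} (j : Nat) (h : ∀ p ≤ j, q p = q' p) :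
    pvD q j = pvD q' j := by
  induction j with
  | zero => simp [pvD, h 0 (le_refl 0)]
  | succ j ih =>
    simp only [pvD, h (j + 1) (le_refl _), ih (fun p hp => h p (Nat.le_succ_of_le hp))]

lemma pvD_le (q : Nat → Bool) (j : Nat) : pvD q j ≤ j := by
  induction j with
  | zero => simp [pvD]; split <;> omega
  | succ j ih => simp only [pvD]; split <;> push_cast <;> omega

lemma pvD_max (q q' : Nat → Bool) (j : Nat) :
    max (pvD q j) (pvD q' j) = pvD (fun p => q p || q' p) j := by
  induction j with
  | zero => simp only [pvD]; split_ifs with h1 h2 h2 <;> simp_all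
  | succ j ih =>
    have hle := pvD_le q j
    have hle' := pvD_le q' j
    have hle2 := pvD_le (fun p => q p || q' p) j
    simp only [pvD]
    split_ifs with h1 h2 h2 <;> simp_all <;> omega

-- dropping index 0 from the search does not change the max with 0
lemma pvD_drop_zero (q : Nat → Bool) (j : Nat) :
    max 0 (pvD q j) = max 0 (pvD (fun p => decide (1 ≤ p) && q p) j) := by
  induction j with
  | zero => simp [pvD]; split <;> simp
  | succ j ih =>
    simp only [pvD]
    have h1 : (1 : Nat) ≤ j + 1 := by omega
    by_cases hq : q (j + 1)
    · simp [hq, h1]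
    · simp [hq, ih]

lemma pvRfind_take (l : List Char) (c : Char) (m : Nat) (hm : m ≤ l.length) :
    PySem.Chars.rfind (l.take m) [c] = pvD (fun p => decide (p < m) && (l[p]? == some c)) m := by
  unfold PySem.Chars.rfind
  rw [pvGo_eq]
  have hlen : (l.take m).length = m := by simp [hm]
  rw [hlen]
  apply pvD_congr
  intro p hp
  by_cases h : p < m
  · simp [h]
  · simp [h]

-- A's rfind, for a single-character needle with start 0 and end idx, as a bounded pvD
lemma pvRfindFrom_eq (l : List Char) (c : Char) (idx e : Int)
    (he : e = if 0 ≤ idx then min idx (l.length : Int) else max ((l.length : Int) + idx) 0) :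
    PySem.Chars.rfindFrom l [c] 0 (some idx) =
      pvD (fun p => decide (p < e.toNat) && (l[p]? == some c)) e.toNat := by
  have h0 : 0 ≤ e := by subst he; split_ifs <;> omega
  have h1 : e ≤ (l.length : Int) := by subst he; split_ifs <;> omega
  simp only [PySem.Chars.rfindFrom]
  norm_num
  have hee : (if (l.length : Int) < idx then (l.length : Int)
      else if idx < 0 then if idx + (l.length : Int) < 0 then 0 else idx + (l.length : Int) else idx) = e := by
    subst he; split_ifs <;> omega
  rw [hee, if_neg (by omega : ¬ e < 0), pvRfind_take l c e.toNat (by omega)]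
  have hcv : pvD (fun p => decide (p < e.toNat) && (l[p]? == some c)) e.toNat =
      pvD (fun p => decide ((p : Int) < e) && (l[p]? == some c)) e.toNat :=
    pvD_congr e.toNat (fun p _ => by
      have h : (p < e.toNat) ↔ ((p : Int) < e) := by omega
      simp [h])
  rw [hcv]
  by_cases hr : pvD (fun p => decide ((p : Int) < e) && (l[p]? == some c)) e.toNat = -1
  · rw [if_pos hr, hr]
  · rw [if_neg hr]

-- the value of A's operator fold: max 0 of the highest operator position below e
lemma pvFoldA (s : String) (idx e : Int)
    (he : e = if 0 ≤ idx then min idx ((s.toList.length : Int)) else max ((s.toList.length : Int) + idx) 0) :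
    (["+", "-", "*", "/"].foldl
      (fun prev_operator operator =>
        let op_idx := PySem.Str.rfindFrom s operator 0 (some idx)
        if op_idx > prev_operator then op_idx else prev_operator) 0) =
    max 0 (pvD (fun p => decide (p < e.toNat) &&
        ((s.toList[p]? == some '+') || ((s.toList[p]? == some '-') ||
         ((s.toList[p]? == some '*') || (s.toList[p]? == some '/'))))) e.toNat) := by
  have hplus : ("+" : String).toList = ['+'] := by decide
  have hminus : ("-" : String).toList = ['-'] := by decide
  have hmul : ("*" : String).toList = ['*'] := by decide
  have hdiv : ("/" : String).toList = ['/'] := by decide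
  simp only [List.foldl_cons, List.foldl_nil, PySem.Str.rfindFrom_eq, hplus, hminus, hmul, hdiv]
  rw [pvRfindFrom_eq s.toList '+' idx e he, pvRfindFrom_eq s.toList '-' idx e he,
      pvRfindFrom_eq s.toList '*' idx e he, pvRfindFrom_eq s.toList '/' idx e he]
  have hmax : ∀ x p : Int, (if x > p then x else p) = max p x := by
    intro x p; split_ifs <;> omega
  simp only [hmax]
  have hassoc : ∀ a b c d : Int, max (max (max (max 0 a) b) c) d = max 0 (max a (max b (max c d))) := by
    intros; omega
  rw [hassoc, pvD_max, pvD_max, pvD_max]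
  apply congrArg
  apply pvD_congr
  intro p _
  by_cases h : p < e.toNat <;> cases hv : s.toList[p]? <;> simp [h]

-- the value of B's backward scan over range(k, 0, -1)
lemma pvScanB (l : List Char) (k : Nat) (hk : k < l.length) :
    pvAltScan l (PySem.List.pyRange (k : Int) 0 (-1)) =
      max 0 (pvD (fun p => decide (1 ≤ p) &&
        ((l[p]? == some '+') || ((l[p]? == some '-') ||
         ((l[p]? == some '*') || (l[p]? == some '/'))))) k) := by
  induction k with
  | zero =>
    rw [PySem.List.pyRange_neg_one_eq_nil (by omega)]
    simp [pvAltScan, pvD]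
  | succ k ih =>
    have hcons : PySem.List.pyRange ((k + 1 : Nat) : Int) 0 (-1) =
        ((k + 1 : Nat) : Int) :: PySem.List.pyRange (k : Int) 0 (-1) := by
      rw [PySem.List.pyRange_neg_one_cons (by push_cast; omega)]
      norm_num
    rw [hcons]
    have hget : PySem.List.pyGet? l ((k + 1 : Nat) : Int) = some l[k + 1] := by
      rw [PySem.List.pyGet?_natCast, List.getElem?_eq_getElem hk]
    have hchars : ("+-*/" : String).toList = ['+', '-', '*', '/'] := by decide
    simp only [pvAltScan, hget, hchars]
    have hq : (decide (1 ≤ k + 1) &&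
        ((l[k + 1]? == some '+') || ((l[k + 1]? == some '-') ||
         ((l[k + 1]? == some '*') || (l[k + 1]? == some '/'))))) =
        decide (l[k + 1] ∈ ['+', '-', '*', '/']) := by
      rw [List.getElem?_eq_getElem hk]
      by_cases hm : l[k + 1] ∈ ['+', '-', '*', '/'] <;> simp_all
    by_cases hm : l[k + 1] ∈ ['+', '-', '*', '/']
    · rw [if_pos hm]
      simp only [pvD, hq]
      rw [if_pos (by simpa using hm)]
      push_cast
      omega
    · rw [if_neg hm]
      simp only [pvD, hq]
      rw [if_neg (by simpa using hm)]
      exact ih (by omega)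

-- Python's own s[:idx] slice is the clamped prefix take
lemma pvPrefix_eq (s : String) (idx e : Int)
    (he : e = if 0 ≤ idx then min idx ((s.toList.length : Int)) else max ((s.toList.length : Int) + idx) 0) :
    (PySem.Str.slice s none (some idx)).toList = s.toList.take e.toNat := by
  rw [PySem.Str.toList_slice, PySem.Chars.slice_eq_listSlice]
  rcases le_or_gt 0 idx with h | h
  · rw [PySem.List.slice_to _ h]
    apply List.take_eq_take_iff.mpr
    subst he
    rw [if_pos h]
    simp
    omega
  · obtain ⟨k, hk, hik⟩ : ∃ k : Nat, 0 < k ∧ idx = -(k : Int) := ⟨(-idx).toNat, by omega, by omega⟩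
    rw [hik, PySem.List.slice_to_neg_natCast s.toList k hk]
    subst he
    rw [if_neg (by omega)]
    congr 1
    omega

-- the two else branches compute the same start index
lemma pvElse_eq (s : String) (idx : Int) :
    (["+", "-", "*", "/"].foldl
      (fun prev_operator operator =>
        let op_idx := PySem.Str.rfindFrom s operator 0 (some idx)
        if op_idx > prev_operator then op_idx else prev_operator) 0) =
    pvAltScan (PySem.Str.slice s none (some idx)).toList
      (PySem.List.pyRange (((PySem.Str.slice s none (some idx)).toList.length : Int) - 1) 0 (-1)) := by
  set e := if 0 ≤ idx then min idx ((s.toList.length : Int)) else max ((s.toList.length : Int) + idx) 0 with he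
  have h0 : 0 ≤ e := by rw [he]; split_ifs <;> omega
  have h1 : e ≤ (s.toList.length : Int) := by rw [he]; split_ifs <;> omega
  have hpre : (PySem.Str.slice s none (some idx)).toList = s.toList.take e.toNat :=
    pvPrefix_eq s idx e he
  have hlen : (s.toList.take e.toNat).length = e.toNat := by
    rw [List.length_take]; omega
  rw [pvFoldA s idx e he, hpre, hlen]
  rcases Nat.eq_zero_or_pos e.toNat with hm | hm
  · rw [hm]
    rw [PySem.List.pyRange_neg_one_eq_nil (by omega)]
    simp [pvAltScan, pvD]
  · have hk : (e.toNat - 1 : Nat) < (s.toList.take e.toNat).length := by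
      rw [List.length_take]; omega
    have hcast : ((e.toNat : Int)) - 1 = ((e.toNat - 1 : Nat) : Int) := by omega
    rw [hcast, pvScanB (s.toList.take e.toNat) (e.toNat - 1) hk]
    have hsame : pvD (fun p => decide (1 ≤ p) &&
        (((s.toList.take e.toNat)[p]? == some '+') || (((s.toList.take e.toNat)[p]? == some '-') ||
         (((s.toList.take e.toNat)[p]? == some '*') || ((s.toList.take e.toNat)[p]? == some '/'))))) (e.toNat - 1) =
      pvD (fun p => decide (1 ≤ p) &&
        ((s.toList[p]? == some '+') || ((s.toList[p]? == some '-') ||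
         ((s.toList[p]? == some '*') || (s.toList[p]? == some '/'))))) (e.toNat - 1) :=
      pvD_congr _ (fun p hp => by
        have hlt : p < e.toNat := by omega
        rw [List.getElem?_take_of_lt hlt])
    rw [hsame]
    obtain ⟨j, hj⟩ : ∃ j, e.toNat = j + 1 := ⟨e.toNat - 1, by omega⟩
    rw [hj]
    have hj' : j + 1 - 1 = j := by omega
    rw [hj']
    have hstep : pvD (fun p => decide (p < j + 1) &&
        ((s.toList[p]? == some '+') || ((s.toList[p]? == some '-') ||
         ((s.toList[p]? == some '*') || (s.toList[p]? == some '/'))))) (j + 1) =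
      pvD (fun p => decide (p < j + 1) &&
        ((s.toList[p]? == some '+') || ((s.toList[p]? == some '-') ||
         ((s.toList[p]? == some '*') || (s.toList[p]? == some '/'))))) j := by
      simp [pvD]
    rw [hstep]
    have hdropbound : pvD (fun p => decide (p < j + 1) &&
        ((s.toList[p]? == some '+') || ((s.toList[p]? == some '-') ||
         ((s.toList[p]? == some '*') || (s.toList[p]? == some '/'))))) j =
      pvD (fun p =>
        ((s.toList[p]? == some '+') || ((s.toList[p]? == some '-') ||
         ((s.toList[p]? == some '*') || (s.toList[p]? == some '/'))))) j :=
      pvD_congr j (fun p hp => by simp [Nat.lt_succ_of_le hp])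
    rw [hdropbound]
    exact pvD_drop_zero _ j

-- ===== VERDICT (by name: the statement is the Claim_ definition above) =====
theorem get_preceeding_factor_spec : Claim_equal_get_preceeding_factor := by
  intro s idx close_to_open _ _
  unfold Spec_get_preceeding_factor get_preceeding_factor get_preceeding_factor_alt
  by_cases h : PySem.Str.pyGet? s (idx - 1) = some ')'
  · simp only [h, if_true]
  · simp only [if_neg h]
    rw [pvElse_eq s idx]
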